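-- pv_equiv track=rewrite | github.com/Kubikolo/matura2020 | zad2.py | get_best_streak
-- ===== SOURCE A (Python) =====
-- def get_best_streak(s):
--     best_streak = 1
--     best_char = s[0]
--     current_streak = 1
--
--     for i in range(1, len(s)):
--         if s[i] == s[i-1]:
--             current_streak += 1
--         else:
--             current_streak = 1
--
--         if current_streak > best_streak:
--             best_char = s[i]
--             best_streak = current_streak
--
--     return best_char, best_streak
-- ===== SOURCE B (Python) =====
-- from itertools import groupby
--
--
-- def get_best_streak(s):
--     runs = [(ch, sum(1 for _ in grp)) for ch, grp in groupby(s)]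
--     return max(runs, key=lambda p: p[1])
-- ===== Notes on version B (the rewrite author's own statement) =====
-- stated objective: idiomatic
-- what changed: Replaces the index-based streak-counting loop with itertools.groupby: the string is split once into maximal runs and max(key=length) picks the first longest run.
import Mathlib
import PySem

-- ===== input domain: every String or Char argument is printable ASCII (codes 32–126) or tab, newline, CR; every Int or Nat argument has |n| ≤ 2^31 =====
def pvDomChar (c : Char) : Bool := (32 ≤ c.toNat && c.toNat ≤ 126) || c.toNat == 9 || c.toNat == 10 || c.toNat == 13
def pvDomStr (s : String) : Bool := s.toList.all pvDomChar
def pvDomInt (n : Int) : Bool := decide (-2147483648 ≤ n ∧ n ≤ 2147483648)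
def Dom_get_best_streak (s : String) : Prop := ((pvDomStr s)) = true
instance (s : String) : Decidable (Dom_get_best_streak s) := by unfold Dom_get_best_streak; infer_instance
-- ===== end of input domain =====

-- B replaces A's index-based streak loop with a groupby-into-runs pass plus first-max selection (idiomatic, same cost).


-- ===== PORT A =====
-- A's loop over i = 1..len-1 carried as structural recursion over the tail,
-- with prev = s[i-1] carried along; same state (best_char, best_streak, current_streak).
def pvALoop (prev bestChar : Char) (bestStreak cur : Int) : List Char → Char × Int
  | [] => (bestChar, bestStreak)
  | c :: rest =>
    let cur' := if c == prev then cur + 1 else 1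
    if cur' > bestStreak then pvALoop c c cur' cur' rest
    else pvALoop c bestChar bestStreak cur' rest

def get_best_streak (s : String) : String × Int :=
  match s.toList with
  | [] => ("", 1)  -- unreachable under Pre_ (Python A raises IndexError on "")
  | c :: rest =>
    let r := pvALoop c c 1 1 rest
    (String.ofList [r.1], r.2)

-- ===== PORT B =====
-- itertools.groupby(s): split into maximal runs (char, length)
def pvRunsAux (c : Char) (n : Int) : List Char → List (Char × Int)
  | [] => [(c, n)]
  | d :: rest => if d == c then pvRunsAux c (n + 1) rest else (c, n) :: pvRunsAux d 1 rest

def pvRuns : List Char → List (Char × Int)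
  | [] => []
  | c :: rest => pvRunsAux c 1 rest

def get_best_streak_alt (s : String) : String × Int :=
  match PySem.List.max? (pvRuns s.toList) (fun p => p.2) with
  | some p => (String.ofList [p.1], p.2)
  | none => ("", 1)  -- unreachable under Pre_ (Python B's max raises on "")

-- ===== PRECONDITION & SPEC =====
-- Pre_ excludes only the empty string, on which both Pythons raise (A: IndexError, B: ValueError).
def Pre_get_best_streak (s : String) : Prop := s ≠ ""
instance (s : String) : Decidable (Pre_get_best_streak s) := by unfold Pre_get_best_streak; infer_instance
def pvWitness_get_best_streak : String := "aab"

def Spec_get_best_streak (s : String) (out : String × Int) : Prop := out = get_best_streak_alt s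
instance (s : String) (out : String × Int) : Decidable (Spec_get_best_streak s out) := by unfold Spec_get_best_streak; infer_instance

-- ===== CLAIM (what is proved, stated in full; the proofs are below) =====
def Claim_equal_get_best_streak : Prop := ∀ (s : String), Dom_get_best_streak s → Pre_get_best_streak s → Spec_get_best_streak s (get_best_streak s)

-- ===== LEMMAS AND PROOFS =====

/-- running first-max over run pairs, seeded with a current best -/
def pvBest : (Char × Int) → List (Char × Int) → Char × Int
  | b, [] => b
  | b, p :: ps => pvBest (if b.2 < p.2 then p else b) ps

lemma pvFoldlMax (f : Option (Char × Int) → (Char × Int) → Option (Char × Int))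
    (hf : ∀ m x, f (some m) x = if m.2 < x.2 then some x else some m) :
    ∀ (l : List (Char × Int)) (b : Char × Int),
      List.foldl f (some b) l = some (pvBest b l) := by
  intro l
  induction l with
  | nil => intro b; simp [pvBest]
  | cons p ps ih =>
    intro b
    simp only [List.foldl, pvBest, hf]
    split_ifs <;> exact ih _

lemma pvMaxCons (b : Char × Int) (l : List (Char × Int)) :
    PySem.List.max? (b :: l) (fun p => p.2) = some (pvBest b l) := by
  unfold PySem.List.max?
  simp only [List.foldl]
  exact pvFoldlMax _ (fun m x => rfl) l b

lemma pvRunsAuxHead (rest : List Char) (c : Char) :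
    ∃ k tl, 0 ≤ k ∧ ∀ n : Int, pvRunsAux c n rest = (c, n + k) :: tl := by
  induction rest generalizing c with
  | nil => exact ⟨0, [], le_refl 0, fun n => by simp [pvRunsAux]⟩
  | cons d rest ih =>
    by_cases hd : d = c
    · obtain ⟨k, tl, hk, h⟩ := ih c
      refine ⟨k + 1, tl, by omega, fun n => ?_⟩
      simp only [pvRunsAux, hd, beq_self_eq_true, if_true]
      rw [h (n + 1)]; ring_nf
    · exact ⟨0, pvRunsAux d 1 rest, le_refl 0, fun n => by
        simp [pvRunsAux, hd]⟩

lemma pvALoopBest (rest : List Char) (prev bc : Char) (bs cur : Int)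
    (h1 : 1 ≤ cur) (h2 : cur ≤ bs) :
    pvALoop prev bc bs cur rest = pvBest (bc, bs) (pvRunsAux prev cur rest) := by
  induction rest generalizing prev bc bs cur with
  | nil =>
    simp only [pvALoop, pvRunsAux, pvBest]
    rw [if_neg (by omega)]
  | cons c rest ih =>
    by_cases hc : c = prev
    · subst hc
      simp only [pvALoop, pvRunsAux, beq_self_eq_true, if_true]
      by_cases hgt : cur + 1 > bs
      · rw [if_pos hgt, ih c c (cur + 1) (cur + 1) (by omega) (le_refl _)]
        obtain ⟨k, tl, hk, hh⟩ := pvRunsAuxHead rest c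
        rw [hh (cur + 1)]
        simp only [pvBest]
        have e1 : (if ((c, cur + 1) : Char × Int).2 < ((c, cur + 1 + k) : Char × Int).2
            then ((c, cur + 1 + k) : Char × Int) else (c, cur + 1)) = (c, cur + 1 + k) := by
          split_ifs with h
          · rfl
          · have hk0 : k = 0 := by
              have h' : ¬ (cur + 1 < cur + 1 + k) := h
              omega
            subst hk0; norm_num
        have e2 : (if ((bc, bs) : Char × Int).2 < ((c, cur + 1 + k) : Char × Int).2
            then ((c, cur + 1 + k) : Char × Int) else (bc, bs)) = (c, cur + 1 + k) := by
          have h' : ((bc, bs) : Char × Int).2 < ((c, cur + 1 + k) : Char × Int).2 := by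
            show bs < cur + 1 + k; omega
          rw [if_pos h']
        rw [e1, e2]
      · rw [if_neg hgt, ih c bc bs (cur + 1) (by omega) (by omega)]
    · have hb : (c == prev) = false := by simp [hc]
      simp only [pvALoop, pvRunsAux, hb, Bool.false_eq_true, if_false]
      rw [if_neg (by omega), ih c bc bs 1 (le_refl 1) (by omega)]
      simp only [pvBest]
      rw [if_neg (show ¬ ((bc, bs) : Char × Int).2 < ((prev, cur) : Char × Int).2 by
        show ¬ bs < cur; omega)]

-- ===== VERDICT (by name: the statement is the Claim_ definition above) =====
theorem get_best_streak_spec : Claim_equal_get_best_streak := by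
  intro s _ _
  unfold Spec_get_best_streak get_best_streak get_best_streak_alt pvRuns
  cases hs : s.toList with
  | nil => rfl
  | cons c rest =>
    simp only []
    obtain ⟨k, tl, hk, hh⟩ := pvRunsAuxHead rest c
    rw [hh 1, pvMaxCons]
    rw [pvALoopBest rest c c 1 1 (le_refl 1) (le_refl 1), hh 1]
    simp only [pvBest]
    have e : (if ((c, (1:Int)) : Char × Int).2 < ((c, 1 + k) : Char × Int).2
        then ((c, 1 + k) : Char × Int) else (c, 1)) = (c, 1 + k) := by
      split_ifs with h
      · rfl
      · have hk0 : k = 0 := by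
          have h' : ¬ ((1 : Int) < 1 + k) := h
          omega
        subst hk0; norm_num
    rw [e]
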